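-- pv_equiv track=rewrite | github.com/LucjanJanowski/bridge_mental_visualization | bridge_app_equalized.py | normalize_cards
-- ===== SOURCE A (Python) =====
-- RANKS_ORDER = ['A', 'K', 'Q', 'J', 'T', '9', '8', '7', '6', '5', '4', '3', '2', 'X']
--
-- def normalize_cards(text):
--     if text is None:
--         return ""
--     raw = text.strip().upper().replace(',', ' ').replace('-', ' ').replace('.', ' ')
--     raw = raw.replace('10', 'T')
--     parts = [p for p in raw.split() if p]
--     tokens = list(parts[0]) if len(parts) == 1 else [ch for p in parts for ch in p]
--     tokens = ['T' if t == '0' else t for t in tokens]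
--     tokens = [t for t in tokens if t in RANKS_ORDER]
--     tokens_sorted = sorted(tokens, key=lambda t: RANKS_ORDER.index(t))
--     return ''.join(tokens_sorted)
-- ===== SOURCE B (Python) =====
-- RANKS_ORDER = ['A', 'K', 'Q', 'J', 'T', '9', '8', '7', '6', '5', '4', '3', '2', 'X']
--
-- def normalize_cards(text):
--     if text is None:
--         return ""
--     raw = text.strip().upper().replace(',', ' ').replace('-', ' ').replace('.', ' ')
--     raw = raw.replace('10', 'T')
--     counts = {}
--     for part in raw.split():
--         for ch in part:
--             if ch == '0':
--                 ch = 'T'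
--             if ch in RANKS_ORDER:
--                 counts[ch] = counts.get(ch, 0) + 1
--     return ''.join(r * counts.get(r, 0) for r in RANKS_ORDER)
-- ===== Notes on version B (the rewrite author's own statement) =====
-- stated objective: alternative
-- what changed: Replaces the comparison sort keyed by RANKS_ORDER.index (and the intermediate token list) with a single counting pass over the split parts plus one emission pass over RANKS_ORDER (a counting/bucket sort).
import Mathlib
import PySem

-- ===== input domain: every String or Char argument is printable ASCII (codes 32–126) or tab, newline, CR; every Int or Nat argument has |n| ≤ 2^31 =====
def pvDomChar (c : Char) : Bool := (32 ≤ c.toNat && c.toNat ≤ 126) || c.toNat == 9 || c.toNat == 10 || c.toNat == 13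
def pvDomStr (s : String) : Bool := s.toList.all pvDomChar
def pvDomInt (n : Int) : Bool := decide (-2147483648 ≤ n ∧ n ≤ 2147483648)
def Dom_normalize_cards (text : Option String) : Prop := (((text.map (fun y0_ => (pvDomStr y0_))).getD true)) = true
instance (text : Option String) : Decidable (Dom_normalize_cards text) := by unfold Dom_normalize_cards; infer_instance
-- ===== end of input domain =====

-- B replaces A's comparison sort (key = RANKS_ORDER.index) by a counting sort:
-- one pass counts each valid rank, then the output is emitted in fixed RANKS_ORDER order.

def pvRanks : List Char := ['A', 'K', 'Q', 'J', 'T', '9', '8', '7', '6', '5', '4', '3', '2', 'X']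

-- ===== PORT A =====
def pvKey (t : Char) : Nat := (PySem.List.index? pvRanks t).getD 0

def normalize_cards (text : Option String) : String :=
  match text with
  | none => ""
  | some t =>
    let raw := PySem.Str.replace (PySem.Str.replace (PySem.Str.replace
                 (PySem.Str.upper (PySem.Str.strip t)) "," " ") "-" " ") "." " "
    let raw := PySem.Str.replace raw "10" "T"
    let parts := (PySem.Str.split₀ raw).filter (fun p => decide (p ≠ ""))
    let tokens : List Char :=
      if parts.length = 1 then ((PySem.List.pyGet? parts 0).getD "").toList
      else parts.flatMap (fun p => p.toList)
    let tokens := tokens.map (fun t => if t = '0' then 'T' else t)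
    let tokens := tokens.filter (fun t => decide (t ∈ pvRanks))
    let tokens_sorted := PySem.List.sorted tokens pvKey false
    String.mk tokens_sorted

-- ===== PORT B =====
def pvStep (d : PySem.Dict Char Nat) (ch0 : Char) : PySem.Dict Char Nat :=
  let ch := if ch0 = '0' then 'T' else ch0
  if ch ∈ pvRanks then d.insert ch (d.getD ch 0 + 1) else d

def normalize_cards_alt (text : Option String) : String :=
  match text with
  | none => ""
  | some t =>
    let raw := PySem.Str.replace (PySem.Str.replace (PySem.Str.replace
                 (PySem.Str.upper (PySem.Str.strip t)) "," " ") "-" " ") "." " "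
    let raw := PySem.Str.replace raw "10" "T"
    let counts := (PySem.Str.split₀ raw).foldl (fun d part => part.toList.foldl pvStep d) PySem.Dict.empty
    String.mk (pvRanks.flatMap (fun r => List.replicate (counts.getD r 0) r))

-- ===== PRECONDITION & SPEC =====
def Spec_normalize_cards (text : Option String) (out : String) : Prop := out = normalize_cards_alt text
instance (text : Option String) (out : String) : Decidable (Spec_normalize_cards text out) := by unfold Spec_normalize_cards; infer_instance

-- ===== CLAIM (what is proved, stated in full; the proofs are below) =====
def Claim_equal_normalize_cards : Prop := ∀ (text : Option String), Dom_normalize_cards text → Spec_normalize_cards text (normalize_cards text)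

-- ===== LEMMAS AND PROOFS =====

def pvMap0 (c : Char) : Char := if c = '0' then 'T' else c

theorem pv_insertBy_cons {α : Type} (before : α → α → Bool) (c y : α) (ys : List α) :
    PySem.List.insertBy before c (y :: ys) =
      if before c y then c :: y :: ys else y :: PySem.List.insertBy before c ys := rfl

theorem pv_insertBy_replicate {α : Type} (before : α → α → Bool) (c a : α)
    (h : before c a = false) :
    ∀ (n : Nat) (l : List α),
      PySem.List.insertBy before c (List.replicate n a ++ l) =
        List.replicate n a ++ PySem.List.insertBy before c l := by
  intro n
  induction n with
  | zero => intro l; simp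
  | succ m ih =>
      intro l
      simp only [List.replicate_succ, List.cons_append, pv_insertBy_cons, h]
      simp [ih l]

theorem pv_insertBy_front {α : Type} (before : α → α → Bool) (c : α) (l : List α)
    (h : ∀ y ∈ l, before c y = true) :
    PySem.List.insertBy before c l = c :: l := by
  cases l with
  | nil => rfl
  | cons y ys => simp [pv_insertBy_cons, h y (by simp)]

theorem pv_flatMap_replicate_congr {α : Type} (ranks : List α) (f g : α → Nat)
    (h : ∀ r ∈ ranks, f r = g r) :
    ranks.flatMap (fun r => List.replicate (f r) r) =
      ranks.flatMap (fun r => List.replicate (g r) r) := by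
  induction ranks with
  | nil => rfl
  | cons r rest ih =>
      simp only [List.flatMap_cons]
      rw [h r (by simp), ih (fun x hx => h x (by simp [hx]))]

theorem pv_mem_bucket {α : Type} (ranks : List α) (cnt : α → Nat) (y : α)
    (hy : y ∈ ranks.flatMap (fun r => List.replicate (cnt r) r)) : y ∈ ranks := by
  simp only [List.mem_flatMap, List.mem_replicate] at hy
  obtain ⟨r, hr, _, rfl⟩ := hy
  exact hr

theorem pv_insertBy_bucket (key : Char → Nat) :
    ∀ (ranks : List Char) (cnt : Char → Nat) (c : Char),
      c ∈ ranks → ranks.Pairwise (fun a b => key a < key b) →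
      PySem.List.insertBy (fun a b => decide (key a < key b)) c
          (ranks.flatMap (fun r => List.replicate (cnt r) r)) =
        ranks.flatMap (fun r => List.replicate (cnt r + if r = c then 1 else 0) r) := by
  intro ranks
  induction ranks with
  | nil => intro cnt c hc; exact absurd hc (by simp)
  | cons r rest ih =>
      intro cnt c hc hp
      rw [List.pairwise_cons] at hp
      simp only [List.flatMap_cons]
      by_cases hcr : c = r
      · subst hcr
        rw [pv_insertBy_replicate _ _ _ (by simp) (cnt c),
            pv_insertBy_front _ _ _ (fun y hy => by
              simp only [decide_eq_true_eq]
              exact hp.1 y (pv_mem_bucket rest cnt y hy))]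
        have hnot : ∀ x ∈ rest, (if x = c then 1 else 0) = 0 := by
          intro x hx
          have : key c < key x := hp.1 x hx
          have : x ≠ c := by intro h; subst h; omega
          simp [this]
        rw [pv_flatMap_replicate_congr rest (fun x => cnt x + if x = c then 1 else 0)
              (fun x => cnt x) (fun x hx => by
                show cnt x + (if x = c then 1 else 0) = cnt x
                rw [hnot x hx]
                omega)]
        simp [List.replicate_succ']
      · have hcrest : c ∈ rest := by
          rcases List.mem_cons.mp hc with h | h
          · exact absurd h hcr
          · exact h
        have hlt : key r < key c := hp.1 c hcrest
        rw [pv_insertBy_replicate _ _ _ (by simp; omega) (cnt r),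
            ih cnt c hcrest hp.2]
        have hne : r ≠ c := fun h => hcr h.symm
        simp [hne]

theorem pv_foldl_insertBy_bucket (key : Char → Nat) (ranks : List Char)
    (hp : ranks.Pairwise (fun a b => key a < key b)) :
    ∀ (cs : List Char) (cnt : Char → Nat), (∀ c ∈ cs, c ∈ ranks) →
      cs.foldl (fun acc x => PySem.List.insertBy (fun a b => decide (key a < key b)) x acc)
          (ranks.flatMap (fun r => List.replicate (cnt r) r)) =
        ranks.flatMap (fun r => List.replicate (cnt r + cs.count r) r) := by
  intro cs
  induction cs with
  | nil => intro cnt _; simp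
  | cons c cs ih =>
      intro cnt hmem
      simp only [List.foldl_cons]
      rw [pv_insertBy_bucket key ranks cnt c (hmem c (by simp)) hp,
          ih (fun r => cnt r + if r = c then 1 else 0) (fun x hx => hmem x (by simp [hx]))]
      apply pv_flatMap_replicate_congr
      intro r _
      rw [List.count_cons]
      by_cases h : r = c
      · subst h; simp; omega
      · have hne : c ≠ r := fun hh => h hh.symm
        simp [h, hne]

theorem pv_sorted_bucket (tokens : List Char) (h : ∀ t ∈ tokens, t ∈ pvRanks) :
    PySem.List.sorted tokens pvKey false =
      pvRanks.flatMap (fun r => List.replicate (tokens.count r) r) := by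
  rw [PySem.List.sorted_eq_foldl_insertBy]
  have h0 : (pvRanks.flatMap (fun r => List.replicate ((fun _ : Char => 0) r) r)) = [] := by
    simp
  calc tokens.foldl (fun acc x => PySem.List.insertBy (fun a b => decide (pvKey a < pvKey b)) x acc) []
      = tokens.foldl (fun acc x => PySem.List.insertBy (fun a b => decide (pvKey a < pvKey b)) x acc)
          (pvRanks.flatMap (fun r => List.replicate ((fun _ : Char => 0) r) r)) := by rw [h0]
    _ = pvRanks.flatMap (fun r => List.replicate ((fun _ : Char => 0) r + tokens.count r) r) :=
        pv_foldl_insertBy_bucket pvKey pvRanks (by decide) tokens _ h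
    _ = pvRanks.flatMap (fun r => List.replicate (tokens.count r) r) := by simp

theorem pv_getD_foldl_pvStep :
    ∀ (cs : List Char) (d : PySem.Dict Char Nat) (r : Char), r ∈ pvRanks →
      (cs.foldl pvStep d).getD r 0 =
        d.getD r 0 + ((cs.map pvMap0).filter (fun t => decide (t ∈ pvRanks))).count r := by
  intro cs
  induction cs with
  | nil => intro d r _; simp
  | cons c cs ih =>
      intro d r hr
      simp only [List.foldl_cons, List.map_cons, List.filter_cons]
      by_cases hch : pvMap0 c ∈ pvRanks
      · have hstep : pvStep d c = d.insert (pvMap0 c) (d.getD (pvMap0 c) 0 + 1) := by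
          simp only [pvStep, pvMap0] at hch ⊢
          simp [hch]
        rw [hstep, ih _ r hr, PySem.Dict.getD_insert]
        simp only [hch, decide_true]
        by_cases h : r = pvMap0 c
        · subst h; simp; omega
        · have hne : pvMap0 c ≠ r := fun hh => h hh.symm
          simp [h, hne]
      · have hstep : pvStep d c = d := by simp [pvStep, pvMap0] at hch ⊢; intro h; exact absurd h hch
        rw [hstep, ih _ r hr]
        simp [hch]

theorem pv_foldl_foldl_flatMap {α β γ : Type} (f : γ → β → γ) (g : α → List β) :
    ∀ (l : List α) (init : γ),
      l.foldl (fun acc x => (g x).foldl f acc) init = (l.flatMap g).foldl f init := by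
  intro l
  induction l with
  | nil => intro init; rfl
  | cons x xs ih => intro init; simp [List.foldl_append, ih]

theorem pv_flatMap_filter_ne_empty (l : List String) :
    (l.filter (fun p => decide (p ≠ ""))).flatMap (fun p => p.toList) =
      l.flatMap (fun p => p.toList) := by
  induction l with
  | nil => rfl
  | cons p ps ih =>
      by_cases h : p = ""
      · subst h; simpa using ih
      · have hd : (decide (p ≠ "")) = true := by simp [h]
        rw [List.filter_cons, hd]
        simp only [if_true, List.flatMap_cons, ih]

theorem pv_tokens_branch (parts : List String) :
    (if parts.length = 1 then ((PySem.List.pyGet? parts 0).getD "").toList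
     else parts.flatMap (fun p => p.toList)) = parts.flatMap (fun p => p.toList) := by
  match parts with
  | [] => simp
  | [p] => simp [PySem.List.pyGet?, PySem.List.pyIdx?]
  | p :: q :: rest => simp

theorem pv_main (parts : List String) :
    PySem.List.sorted
      (((if (parts.filter (fun p => decide (p ≠ ""))).length = 1 then
            ((PySem.List.pyGet? (parts.filter (fun p => decide (p ≠ ""))) 0).getD "").toList
          else (parts.filter (fun p => decide (p ≠ ""))).flatMap (fun p => p.toList)).map
        (fun t => if t = '0' then 'T' else t)).filter (fun t => decide (t ∈ pvRanks)))
      pvKey false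
    = pvRanks.flatMap (fun r => List.replicate
        ((parts.foldl (fun d part => part.toList.foldl pvStep d) PySem.Dict.empty).getD r 0) r) := by
  rw [pv_tokens_branch, pv_flatMap_filter_ne_empty]
  have hm : (fun t : Char => if t = '0' then 'T' else t) = pvMap0 := rfl
  rw [hm, pv_foldl_foldl_flatMap pvStep (fun p : String => p.toList) parts PySem.Dict.empty]
  set cs := parts.flatMap (fun p => p.toList) with hcs
  rw [pv_sorted_bucket ((cs.map pvMap0).filter (fun t => decide (t ∈ pvRanks)))
        (by intro t ht; simp only [List.mem_filter, decide_eq_true_eq] at ht; exact ht.2)]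
  apply pv_flatMap_replicate_congr
  intro r hr
  rw [pv_getD_foldl_pvStep cs PySem.Dict.empty r hr]
  simp [PySem.Dict.getD, PySem.Dict.get?, PySem.Dict.empty]

-- ===== VERDICT (by name: the statement is the Claim_ definition above) =====
theorem normalize_cards_spec : Claim_equal_normalize_cards := by
  intro text _
  unfold Spec_normalize_cards normalize_cards normalize_cards_alt
  cases text with
  | none => rfl
  | some t => exact congrArg String.mk (pv_main _)
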